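-- pv_equiv track=rewrite | github.com/poitrek/Project-Euler-Problems | 51_prime_digit_replacements.py | contains_3_equal_digits
-- ===== SOURCE A (Python) =====
-- from collections import defaultdict
--
-- def contains_3_equal_digits(n) -> bool:
--     """checks if the number contains 3 equal digits"""
--     dig_cnt = defaultdict(int)
--     for c in str(n):
--         dig_cnt[c] += 1
--     for dcnt in dig_cnt.values():
--         if dcnt >= 3:
--             return True
--     return False
-- ===== SOURCE B (Python) =====
-- def contains_3_equal_digits(n) -> bool:
--     """checks if the number contains 3 equal digits"""
--     s = sorted(str(n))
--     while len(s) >= 3: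
--         if s[0] == s[1] == s[2]:
--             return True
--         s = s[1:]
--     return False
-- ===== Notes on version B (the rewrite author's own statement) =====
-- stated objective: alternative
-- what changed: Replaced the frequency-dict tally with sort-then-scan: sort the characters of str(n) and look for a run of three consecutive equal characters, which exists iff some character occurs three or more times.
import Mathlib
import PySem

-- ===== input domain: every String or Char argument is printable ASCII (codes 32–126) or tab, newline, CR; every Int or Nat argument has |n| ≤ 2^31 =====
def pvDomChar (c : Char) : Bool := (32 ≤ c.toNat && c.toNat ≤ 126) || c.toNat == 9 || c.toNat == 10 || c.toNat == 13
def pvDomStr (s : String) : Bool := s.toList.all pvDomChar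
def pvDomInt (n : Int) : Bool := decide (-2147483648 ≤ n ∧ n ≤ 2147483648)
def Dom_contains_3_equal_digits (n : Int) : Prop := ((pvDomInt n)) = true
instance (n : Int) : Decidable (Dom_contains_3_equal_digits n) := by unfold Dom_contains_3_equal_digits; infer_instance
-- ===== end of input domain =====

-- B replaces A's frequency dictionary with sort-then-scan: sort the characters of str(n)
-- and look for a run of three consecutive equal characters (objective: alternative algorithm).

-- ===== PORT A =====
-- dig_cnt = defaultdict(int); for c in str(n): dig_cnt[c] += 1  — i.e. d.modify c 0 (·+1)
-- for dcnt in dig_cnt.values(): if dcnt >= 3: return True; return False  — the early-return loop is List.any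
def contains_3_equal_digits (n : Int) : Bool :=
  let dig_cnt : PySem.Dict Char Int :=
    ((PySem.Int.toStr n).toList).foldl (fun d c => d.modify c 0 (· + 1)) PySem.Dict.empty
  dig_cnt.values.any (fun dcnt => decide (3 ≤ dcnt))

-- ===== PORT B =====
-- while len(s) >= 3: if s[0] == s[1] == s[2]: return True; s = s[1:]  — structural recursion on the list
def pvHasRun3 : List Char → Bool
  | a :: b :: c :: rest => (a == b && b == c) || pvHasRun3 (b :: c :: rest)
  | _ => false

-- s = sorted(str(n)); then the while-loop above
def contains_3_equal_digits_alt (n : Int) : Bool :=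
  pvHasRun3 (PySem.List.sorted ((PySem.Int.toStr n).toList) (fun c => c) false)

-- ===== PRECONDITION & SPEC =====
def Spec_contains_3_equal_digits (n : Int) (out : Bool) : Prop := out = contains_3_equal_digits_alt n
instance (n : Int) (out : Bool) : Decidable (Spec_contains_3_equal_digits n out) := by unfold Spec_contains_3_equal_digits; infer_instance

-- ===== CLAIM (what is proved, stated in full; the proofs are below) =====
def Claim_equal_contains_3_equal_digits : Prop := ∀ (n : Int), Dom_contains_3_equal_digits n → Spec_contains_3_equal_digits n (contains_3_equal_digits n)

-- ===== LEMMAS AND PROOFS =====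

-- if some tail has a run of three, so does the whole list
theorem pvHasRun3_cons_of (a : Char) {t : List Char} (h : pvHasRun3 t = true) :
    pvHasRun3 (a :: t) = true := by
  match t, h with
  | b :: c :: r, h => simp [pvHasRun3, h]

-- in a ≤-sorted list, a run of three equal consecutive characters exists iff some character has count ≥ 3
theorem pvHasRun3_iff_count (l : List Char) (hs : l.Pairwise (· ≤ ·)) :
    pvHasRun3 l = true ↔ ∃ c, 3 ≤ l.count c := by
  induction l with
  | nil => simp [pvHasRun3]
  | cons a t ih =>
    have hst : t.Pairwise (· ≤ ·) := hs.of_cons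
    constructor
    · intro h
      match t, h with
      | b :: c :: r, h =>
        simp only [pvHasRun3, Bool.or_eq_true, Bool.and_eq_true, beq_iff_eq] at h
        rcases h with ⟨hab, hbc⟩ | h
        · refine ⟨a, ?_⟩
          subst hab; subst hbc
          simp [List.count_cons_self]
        · obtain ⟨x, hx⟩ := (ih hst).mp h
          exact ⟨x, hx.trans ((List.sublist_cons_self a _).count_le x)⟩
    · rintro ⟨x, hx⟩
      by_cases hxa : x = a
      · subst hxa
        have hct : 2 ≤ t.count x := by rw [List.count_cons_self] at hx; omega
        cases t with
        | nil => simp at hct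
        | cons b t' =>
          have hxb : x = b := by
            have hxind : x ∈ b :: t' := List.count_pos_iff.mp (by omega)
            rcases List.mem_cons.mp hxind with h | h
            · exact h
            · have h1 : x ≤ b := (List.pairwise_cons.mp hs).1 b (List.mem_cons_self ..)
              have h2 : b ≤ x := (List.pairwise_cons.mp hst).1 x h
              exact le_antisymm h1 h2
          subst hxb
          have hct' : 1 ≤ t'.count x := by rw [List.count_cons_self] at hct; omega
          cases t' with
          | nil => simp at hct'
          | cons c t'' =>
            have hxc : x = c := by
              have hxind : x ∈ c :: t'' := List.count_pos_iff.mp (by omega)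
              rcases List.mem_cons.mp hxind with h | h
              · exact h
              · have h1 : x ≤ c := (List.pairwise_cons.mp hst).1 c (List.mem_cons_self ..)
                have h2 : c ≤ x := (List.pairwise_cons.mp hst.of_cons).1 x h
                exact le_antisymm h1 h2
            simp [pvHasRun3, hxc]
      · have hct : 3 ≤ t.count x := by
          rw [List.count_cons] at hx
          simpa [Ne.symm hxa] using hx
        exact pvHasRun3_cons_of a ((ih hst).mpr ⟨x, hct⟩)

-- ===== VERDICT (by name: the statement is the Claim_ definition above) =====
theorem contains_3_equal_digits_spec : Claim_equal_contains_3_equal_digits := by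
  intro n _
  unfold Spec_contains_3_equal_digits contains_3_equal_digits contains_3_equal_digits_alt
  set chars := (PySem.Int.toStr n).toList with hchars
  -- A's side: the counter's values are the counts of the distinct characters
  have hc : chars.foldl (fun d c => d.modify c 0 (· + 1)) PySem.Dict.empty
      = PySem.Dict.counter chars := rfl
  rw [hc]
  simp only [PySem.Dict.values, PySem.Dict.items_counter, List.map_map, List.any_map,
    Function.comp_def]
  -- B's side: run-of-three in the sorted list ↔ some character counted ≥ 3
  have hperm : (PySem.List.sorted chars (fun c => c) false).Perm chars :=
    PySem.List.sorted_perm ..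
  have hiff := pvHasRun3_iff_count (PySem.List.sorted chars (fun c => c) false)
    (by simpa using PySem.List.sorted_pairwise chars (fun c => c))
  rw [Bool.eq_iff_iff, hiff]
  simp only [List.any_eq_true, decide_eq_true_eq]
  constructor
  · rintro ⟨x, -, hx⟩
    refine ⟨x, ?_⟩
    have hcnt := hperm.count_eq x
    omega
  · rintro ⟨x, hx⟩
    have hcnt := hperm.count_eq x
    have hmem : x ∈ chars := hperm.subset (List.count_pos_iff.mp (by omega))
    refine ⟨x, by simpa [PySem.Set.mem_ofList] using hmem, ?_⟩
    omega
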